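-- pv_equiv track=rewrite | github.com/msm-code/advent-of-duck | 2021/23/1.py | steps_to_room
-- ===== SOURCE A (Python) =====
-- def steps_to_room(hallway, hndx, rndx):
--     steps = -1 if hndx in [0, 6] else 0
--     hndx, rndx = hndx * 2, (rndx*2) + 3
--     while True:
--         if hndx == rndx:
--             return steps
--         hndx = hndx + (1 if rndx > hndx else -1)
--         steps += 1
--         if hndx % 2 == 0 and hallway[hndx//2] is not None:
--             return None
-- ===== SOURCE B (Python) =====
-- def steps_to_room(hallway, hndx, rndx):
--     # Closed-form distance plus one scan over the even cells strictly between
--     # start and target, instead of A's step-by-step walk.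
--     target = 2 * rndx + 3
--     dist = abs(target - 2 * hndx) - (1 if hndx in (0, 6) else 0)
--     if 2 * hndx < target:
--         cells = range(hndx + 1, rndx + 2)
--     else:
--         cells = range(hndx - 1, rndx + 1, -1)
--     if any(hallway[j] is not None for j in cells):
--         return None
--     return dist
-- ===== Notes on version B (the rewrite author's own statement) =====
-- stated objective: simpler
-- what changed: A walks cell by cell from the hallway position to the room mouth counting steps; B computes the step count as a closed-form arithmetic distance and checks blockage with one short-circuit scan over the even hallway cells strictly between start and target.
import Mathlib
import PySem

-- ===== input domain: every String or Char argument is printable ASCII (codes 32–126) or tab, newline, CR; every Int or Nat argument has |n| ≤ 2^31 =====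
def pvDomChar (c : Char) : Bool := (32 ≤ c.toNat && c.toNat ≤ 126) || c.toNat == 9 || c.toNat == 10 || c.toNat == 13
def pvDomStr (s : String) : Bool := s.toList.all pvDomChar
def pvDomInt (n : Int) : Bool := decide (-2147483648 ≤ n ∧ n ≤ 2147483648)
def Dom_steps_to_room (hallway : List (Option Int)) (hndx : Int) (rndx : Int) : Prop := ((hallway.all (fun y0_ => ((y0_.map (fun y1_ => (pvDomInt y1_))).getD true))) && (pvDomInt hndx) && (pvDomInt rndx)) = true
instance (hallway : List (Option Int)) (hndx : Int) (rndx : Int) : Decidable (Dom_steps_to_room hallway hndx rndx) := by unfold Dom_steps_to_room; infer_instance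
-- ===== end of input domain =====

-- B replaces A's cell-by-cell walk with a closed-form distance plus one scan over
-- the intervening even hallway cells (objective: simpler).

-- ===== PORT A =====
-- A's while-True walk; where Python raises IndexError (pyGet? = none) the port
-- treats the cell as empty and walks on — such inputs are excluded by Pre_steps_to_room.
def stepsToRoomLoop (hallway : List (Option Int)) (hndx rndx steps : Int) : Option Int :=
  if _h : hndx = rndx then some steps
  else
    if PySem.Int.mod (hndx + (if rndx > hndx then 1 else -1)) 2 == 0
       && ((PySem.List.pyGet? hallway
              (PySem.Int.floordiv (hndx + (if rndx > hndx then 1 else -1)) 2)).getD none).isSome then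
      none
    else
      stepsToRoomLoop hallway (hndx + (if rndx > hndx then 1 else -1)) rndx (steps + 1)
termination_by (rndx - hndx).natAbs
decreasing_by split <;> omega

def steps_to_room (hallway : List (Option Int)) (hndx : Int) (rndx : Int) : Option Int :=
  let steps : Int := if hndx = 0 ∨ hndx = 6 then -1 else 0
  stepsToRoomLoop hallway (hndx * 2) (rndx * 2 + 3) steps

-- ===== PORT B =====
-- any(hallway[j] is not None for j in range(a, b)): a short-circuit scan; at an
-- index where Python raises IndexError (pyGet? = none) it stops — excluded by Pre_.
def scanRight (hallway : List (Option Int)) (j b : Int) : Bool :=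
  if _h : b ≤ j then false
  else
    match PySem.List.pyGet? hallway j with
    | none => false
    | some c => c.isSome || scanRight hallway (j + 1) b
termination_by (b - j).toNat
decreasing_by omega

-- the same for range(a, b, -1)
def scanLeft (hallway : List (Option Int)) (j b : Int) : Bool :=
  if _h : j ≤ b then false
  else
    match PySem.List.pyGet? hallway j with
    | none => false
    | some c => c.isSome || scanLeft hallway (j - 1) b
termination_by (j - b).toNat
decreasing_by omega

def steps_to_room_alt (hallway : List (Option Int)) (hndx : Int) (rndx : Int) : Option Int :=
  let target : Int := 2 * rndx + 3
  let dist : Int := |target - 2 * hndx| - (if hndx = 0 ∨ hndx = 6 then 1 else 0)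
  let blocked : Bool :=
    if 2 * hndx < target then scanRight hallway (hndx + 1) (rndx + 2)
    else scanLeft hallway (hndx - 1) (rndx + 1)
  if blocked then none else some dist

-- ===== PRECONDITION & SPEC =====
-- hallway[j] is not None (used by Pre_ and the proofs)
def cellBlocked (hallway : List (Option Int)) (j : Int) : Bool :=
  ((PySem.List.pyGet? hallway j).getD none).isSome

-- Pre_ holds exactly when A's walk finishes without an IndexError: the first
-- inspected cell (the even cells strictly between start and target, possibly at
-- negative, i.e. wrapped, indices) is a valid Python index, and either all
-- inspected cells are valid or an occupied valid cell stops the walk before the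
-- first invalid index; outside Pre_ A raises IndexError.
def Pre_steps_to_room (hallway : List (Option Int)) (hndx : Int) (rndx : Int) : Prop :=
  if hndx ≤ rndx then
    -(hallway.length : Int) ≤ hndx + 1 ∧ hndx + 1 < (hallway.length : Int) ∧
      (rndx + 1 < (hallway.length : Int) ∨
        (PySem.List.pyRange (hndx + 1) (hallway.length : Int) 1).any (cellBlocked hallway) = true)
  else if hndx ≤ rndx + 2 then True
  else
    -(hallway.length : Int) ≤ hndx - 1 ∧ hndx - 1 < (hallway.length : Int) ∧
      (-(hallway.length : Int) ≤ rndx + 2 ∨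
        (PySem.List.pyRange (hndx - 1) (-(hallway.length : Int) - 1) (-1)).any (cellBlocked hallway) = true)
instance (hallway : List (Option Int)) (hndx : Int) (rndx : Int) : Decidable (Pre_steps_to_room hallway hndx rndx) := by unfold Pre_steps_to_room; infer_instance

def pvWitness_steps_to_room : List (Option Int) × Int × Int :=
  ([none, none, none, none, none, none, none], 0, 1)

def Spec_steps_to_room (hallway : List (Option Int)) (hndx : Int) (rndx : Int) (out : Option Int) : Prop := out = steps_to_room_alt hallway hndx rndx
instance (hallway : List (Option Int)) (hndx : Int) (rndx : Int) (out : Option Int) : Decidable (Spec_steps_to_room hallway hndx rndx out) := by unfold Spec_steps_to_room; infer_instance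

-- ===== CLAIM (what is proved, stated in full; the proofs are below) =====
def Claim_equal_steps_to_room : Prop := ∀ (hallway : List (Option Int)) (hndx : Int) (rndx : Int), Dom_steps_to_room hallway hndx rndx → Pre_steps_to_room hallway hndx rndx → Spec_steps_to_room hallway hndx rndx (steps_to_room hallway hndx rndx)

-- ===== LEMMAS AND PROOFS =====

lemma loop_done (hw : List (Option Int)) (a s : Int) : stepsToRoomLoop hw a a s = some s := by
  rw [stepsToRoomLoop]; simp

lemma loop_step (hw : List (Option Int)) (a t s a' : Int) (hne : a ≠ t)
    (ha' : a' = a + (if t > a then 1 else -1)) :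
    stepsToRoomLoop hw a t s =
      if PySem.Int.mod a' 2 == 0 && cellBlocked hw (PySem.Int.floordiv a' 2) then none
      else stepsToRoomLoop hw a' t (s + 1) := by
  rw [stepsToRoomLoop, dif_neg hne, ha']; rfl

lemma mod_two_odd (h : Int) : (PySem.Int.mod (2 * h + 1) 2 == 0) = false := by
  simp only [beq_eq_false_iff_ne, ne_eq, PySem.Int.mod_eq_zero_iff_dvd]
  omega

lemma mod_two_even (h : Int) : (PySem.Int.mod (2 * h) 2 == 0) = true := by
  simp only [beq_iff_eq, PySem.Int.mod_eq_zero_iff_dvd]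
  omega

lemma floordiv_two_even (h : Int) : PySem.Int.floordiv (2 * h) 2 = h := by
  rw [PySem.Int.floordiv_eq_iff_of_pos (by norm_num)]
  omega

lemma loop_right (hw : List (Option Int)) (k : Nat) : ∀ (h steps : Int),
    stepsToRoomLoop hw (2 * h) (2 * h + (2 * (k : Int) + 1)) steps =
      if (PySem.List.pyRange (h + 1) (h + (k : Int) + 1) 1).any (cellBlocked hw) then none
      else some (steps + (2 * (k : Int) + 1)) := by
  induction k with
  | zero =>
    intro h steps
    rw [loop_step hw _ _ _ (2 * h + 1) (by omega) (by split <;> omega)]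
    rw [mod_two_odd, Bool.false_and, if_neg (by simp)]
    rw [show (2 * h + (2 * ((0:Nat) : Int) + 1)) = 2 * h + 1 by push_cast; ring]
    rw [loop_done, PySem.List.pyRange_one_eq_nil (by omega)]
    simp
  | succ k ih =>
    intro h steps
    rw [loop_step hw _ _ _ (2 * h + 1) (by omega) (by split <;> omega)]
    rw [mod_two_odd, Bool.false_and, if_neg (by simp)]
    rw [loop_step hw _ _ _ (2 * (h + 1)) (by omega) (by split <;> omega)]
    rw [mod_two_even, Bool.true_and, floordiv_two_even]
    rw [PySem.List.pyRange_one_cons (by omega)]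
    simp only [List.any_cons]
    by_cases hb : cellBlocked hw (h + 1) = true
    · rw [if_pos hb]; simp [hb]
    · have hb' : cellBlocked hw (h + 1) = false := by simpa using hb
      rw [if_neg hb]; simp only [hb', Bool.false_or]
      rw [show (2 * h + (2 * ((k + 1 : Nat) : Int) + 1)) = 2 * (h + 1) + (2 * (k : Int) + 1) by push_cast; ring]
      rw [ih]
      rw [show (h + 1) + (k : Int) + 1 = h + ((k + 1 : Nat) : Int) + 1 by push_cast; ring]
      split
      · rfl
      · congr 1; push_cast; ring

lemma loop_left (hw : List (Option Int)) (k : Nat) : ∀ (h steps : Int),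
    stepsToRoomLoop hw (2 * h) (2 * h - (2 * (k : Int) + 1)) steps =
      if (PySem.List.pyRange (h - 1) (h - (k : Int) - 1) (-1)).any (cellBlocked hw) then none
      else some (steps + (2 * (k : Int) + 1)) := by
  induction k with
  | zero =>
    intro h steps
    rw [loop_step hw _ _ _ (2 * (h - 1) + 1) (by omega) (by split <;> omega)]
    rw [mod_two_odd, Bool.false_and, if_neg (by simp)]
    rw [show (2 * h - (2 * ((0:Nat) : Int) + 1)) = 2 * (h - 1) + 1 by push_cast; ring]
    rw [loop_done, PySem.List.pyRange_neg_one_eq_nil (by omega)]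
    simp
  | succ k ih =>
    intro h steps
    rw [loop_step hw _ _ _ (2 * (h - 1) + 1) (by omega) (by split <;> omega)]
    rw [mod_two_odd, Bool.false_and, if_neg (by simp)]
    rw [loop_step hw _ _ _ (2 * (h - 1)) (by omega) (by split <;> omega)]
    rw [mod_two_even, Bool.true_and, floordiv_two_even]
    rw [PySem.List.pyRange_neg_one_cons (by omega)]
    simp only [List.any_cons]
    by_cases hb : cellBlocked hw (h - 1) = true
    · rw [if_pos hb]; simp [hb]
    · have hb' : cellBlocked hw (h - 1) = false := by simpa using hb
      rw [if_neg hb]; simp only [hb', Bool.false_or]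
      rw [show (2 * h - (2 * ((k + 1 : Nat) : Int) + 1)) = 2 * (h - 1) - (2 * (k : Int) + 1) by push_cast; ring]
      rw [ih]
      rw [show (h - 1) - (k : Int) - 1 = h - ((k + 1 : Nat) : Int) - 1 by push_cast; ring]
      split
      · rfl
      · congr 1; push_cast; ring

-- when every index of the range is a valid Python index, the short-circuit scan
-- agrees with 'any' over the materialised range
lemma scanRight_eq (hw : List (Option Int)) (b : Int) : ∀ (a : Int),
    (∀ j : Int, a ≤ j → j < b → -(hw.length : Int) ≤ j ∧ j < (hw.length : Int)) →
    scanRight hw a b = (PySem.List.pyRange a b 1).any (cellBlocked hw) := by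
  intro a
  induction hn : (b - a).toNat generalizing a with
  | zero =>
    intro _
    rw [scanRight, dif_pos (by omega), PySem.List.pyRange_one_eq_nil (by omega)]
    simp
  | succ n ih =>
    intro hvalid
    have hin : PySem.Raise.InRange hw.length a := by
      have := hvalid a le_rfl (by omega)
      constructor <;> omega
    obtain ⟨c, hc⟩ : ∃ c, PySem.List.pyGet? hw a = some c := by
      rcases h : PySem.List.pyGet? hw a with _ | c
      · exact absurd hin (((PySem.List.pyGet?_eq_none_iff _ _).mp h))
      · exact ⟨c, rfl⟩
    rw [scanRight, dif_neg (by omega), hc]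
    rw [PySem.List.pyRange_one_cons (by omega), List.any_cons]
    rw [ih (a + 1) (by omega) (fun j h1 h2 => hvalid j (by omega) h2)]
    simp [cellBlocked, hc]

lemma scanLeft_eq (hw : List (Option Int)) (b : Int) : ∀ (a : Int),
    (∀ j : Int, b < j → j ≤ a → -(hw.length : Int) ≤ j ∧ j < (hw.length : Int)) →
    scanLeft hw a b = (PySem.List.pyRange a b (-1)).any (cellBlocked hw) := by
  intro a
  induction hn : (a - b).toNat generalizing a with
  | zero =>
    intro _
    rw [scanLeft, dif_pos (by omega), PySem.List.pyRange_neg_one_eq_nil (by omega)]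
    simp
  | succ n ih =>
    intro hvalid
    have hin : PySem.Raise.InRange hw.length a := by
      have := hvalid a (by omega) le_rfl
      constructor <;> omega
    obtain ⟨c, hc⟩ : ∃ c, PySem.List.pyGet? hw a = some c := by
      rcases h : PySem.List.pyGet? hw a with _ | c
      · exact absurd hin (((PySem.List.pyGet?_eq_none_iff _ _).mp h))
      · exact ⟨c, rfl⟩
    rw [scanLeft, dif_neg (by omega), hc]
    rw [PySem.List.pyRange_neg_one_cons (by omega), List.any_cons]
    rw [ih (a - 1) (by omega) (fun j h1 h2 => hvalid j h1 (by omega))]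
    simp [cellBlocked, hc]

-- if some valid index j in [a, b) holds an occupied cell, the right scan finds a
-- blocked cell (every index it passes on the way to j is valid)
lemma scanRight_true (hw : List (Option Int)) (b j : Int) (hjb : j < b)
    (hjL : j < (hw.length : Int)) (hbl : cellBlocked hw j = true) : ∀ a : Int,
    -(hw.length : Int) ≤ a → a ≤ j → scanRight hw a b = true := by
  intro a
  induction hn : (j - a).toNat generalizing a with
  | zero =>
    intro hL hj
    have ha : a = j := by omega
    obtain ⟨c, hc⟩ : ∃ c, PySem.List.pyGet? hw a = some c := by
      rcases h : PySem.List.pyGet? hw a with _ | c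
      · exact absurd ⟨by omega, by omega⟩ ((PySem.List.pyGet?_eq_none_iff _ _).mp h)
      · exact ⟨c, rfl⟩
    rw [scanRight, dif_neg (by omega), hc]
    have : c.isSome = true := by
      have := hbl; rw [← ha] at this; simpa [cellBlocked, hc] using this
    simp [this]
  | succ n ih =>
    intro hL hj
    obtain ⟨c, hc⟩ : ∃ c, PySem.List.pyGet? hw a = some c := by
      rcases h : PySem.List.pyGet? hw a with _ | c
      · exact absurd ⟨by omega, by omega⟩ ((PySem.List.pyGet?_eq_none_iff _ _).mp h)
      · exact ⟨c, rfl⟩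
    rw [scanRight, dif_neg (by omega), hc]
    rw [ih (a + 1) (by omega) (by omega) (by omega)]
    simp

lemma scanLeft_true (hw : List (Option Int)) (b j : Int) (hjb : b < j)
    (hjL : -(hw.length : Int) ≤ j) (hbl : cellBlocked hw j = true) : ∀ a : Int,
    a < (hw.length : Int) → j ≤ a → scanLeft hw a b = true := by
  intro a
  induction hn : (a - j).toNat generalizing a with
  | zero =>
    intro hL hj
    have ha : a = j := by omega
    obtain ⟨c, hc⟩ : ∃ c, PySem.List.pyGet? hw a = some c := by
      rcases h : PySem.List.pyGet? hw a with _ | c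
      · exact absurd ⟨by omega, by omega⟩ ((PySem.List.pyGet?_eq_none_iff _ _).mp h)
      · exact ⟨c, rfl⟩
    rw [scanLeft, dif_neg (by omega), hc]
    have : c.isSome = true := by
      have := hbl; rw [← ha] at this; simpa [cellBlocked, hc] using this
    simp [this]
  | succ n ih =>
    intro hL hj
    obtain ⟨c, hc⟩ : ∃ c, PySem.List.pyGet? hw a = some c := by
      rcases h : PySem.List.pyGet? hw a with _ | c
      · exact absurd ⟨by omega, by omega⟩ ((PySem.List.pyGet?_eq_none_iff _ _).mp h)
      · exact ⟨c, rfl⟩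
    rw [scanLeft, dif_neg (by omega), hc]
    rw [ih (a - 1) (by omega) (by omega) (by omega)]
    simp

lemma ports_agree (hallway : List (Option Int)) (hndx rndx : Int)
    (hpre : Pre_steps_to_room hallway hndx rndx) :
    steps_to_room hallway hndx rndx = steps_to_room_alt hallway hndx rndx := by
  unfold Pre_steps_to_room at hpre
  simp only [steps_to_room, steps_to_room_alt]
  by_cases hc : 2 * hndx < 2 * rndx + 3
  · -- moving right: gap = 2k+1 with k = rndx + 1 - hndx ≥ 0
    obtain ⟨k, hkk⟩ : ∃ k : Nat, (k : Int) = rndx + 1 - hndx := ⟨(rndx + 1 - hndx).toNat, by omega⟩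
    rw [show hndx * 2 = 2 * hndx by ring,
        show rndx * 2 + 3 = 2 * hndx + (2 * (k : Int) + 1) by omega, loop_right]
    rw [if_pos hc, show hndx + (k : Int) + 1 = rndx + 2 by omega,
        show |2 * rndx + 3 - 2 * hndx| = 2 * (k : Int) + 1 by rw [abs_of_pos (by omega)]; omega]
    by_cases hd : hndx ≤ rndx
    · rw [if_pos hd] at hpre
      obtain ⟨h1, h2, h3⟩ := hpre
      by_cases hv : rndx + 1 < (hallway.length : Int)
      · -- every inspected index is valid
        rw [scanRight_eq hallway (rndx + 2) (hndx + 1) (fun j ha hb => by omega)]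
        split
        · rfl
        · congr 1; split <;> omega
      · -- an occupied valid cell stops both programs before the first invalid index
        obtain ⟨x, hx, hbx⟩ := List.any_eq_true.mp (h3.resolve_left hv)
        obtain ⟨hx1, hx2⟩ := (PySem.List.mem_pyRange_one).mp hx
        rw [if_pos (List.any_eq_true.mpr ⟨x, (PySem.List.mem_pyRange_one).mpr ⟨hx1, by omega⟩, hbx⟩),
            if_pos (scanRight_true hallway (rndx + 2) x (by omega) (by omega) hbx (hndx + 1) (by omega) (by omega))]
    · -- hndx = rndx + 1: the scanned range is empty
      rw [scanRight, dif_pos (by omega), PySem.List.pyRange_one_eq_nil (by omega)]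
      simp only [List.any_nil, Bool.false_eq_true, if_false]
      congr 1; split <;> omega
  · -- moving left: 2*hndx > 2*rndx+3 (equality is impossible by parity)
    obtain ⟨k, hkk⟩ : ∃ k : Nat, (k : Int) = hndx - rndx - 2 := ⟨(hndx - rndx - 2).toNat, by omega⟩
    rw [show hndx * 2 = 2 * hndx by ring,
        show rndx * 2 + 3 = 2 * hndx - (2 * (k : Int) + 1) by omega, loop_left]
    rw [if_neg hc, show hndx - (k : Int) - 1 = rndx + 1 by omega,
        show |2 * rndx + 3 - 2 * hndx| = 2 * (k : Int) + 1 by rw [abs_of_neg (by omega)]; omega]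
    by_cases hd : hndx ≤ rndx + 2
    · -- hndx = rndx + 2: the scanned range is empty
      rw [scanLeft, dif_pos (by omega), PySem.List.pyRange_neg_one_eq_nil (by omega)]
      simp only [List.any_nil, Bool.false_eq_true, if_false]
      congr 1; split <;> omega
    · rw [if_neg (by omega), if_neg hd] at hpre
      obtain ⟨h1, h2, h3⟩ := hpre
      by_cases hv : -(hallway.length : Int) ≤ rndx + 2
      · rw [scanLeft_eq hallway (rndx + 1) (hndx - 1) (fun j ha hb => by omega)]
        split
        · rfl
        · congr 1; split <;> omega
      · obtain ⟨x, hx, hbx⟩ := List.any_eq_true.mp (h3.resolve_left hv)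
        obtain ⟨hx1, hx2⟩ := (PySem.List.mem_pyRange_neg_one).mp hx
        rw [if_pos (List.any_eq_true.mpr ⟨x, (PySem.List.mem_pyRange_neg_one).mpr ⟨by omega, hx2⟩, hbx⟩),
            if_pos (scanLeft_true hallway (rndx + 1) x (by omega) (by omega) hbx (hndx - 1) (by omega) hx2)]

-- ===== VERDICT (by name: the statement is the Claim_ definition above) =====
theorem steps_to_room_spec : Claim_equal_steps_to_room := by
  intro hallway hndx rndx _ hpre
  exact ports_agree hallway hndx rndx hpre
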